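-- pv_equiv track=rewrite | github.com/GiulioCMSanto/HDSIdent | HDSIdent/initial_intervals/bandpass_filter.py | _create_sequential_indicating_sequences
-- ===== SOURCE A (Python) =====
-- def _create_sequential_indicating_sequences(indicating_sequence):
--     """
--     This function gets the indicating sequence for a given data
--     and creates the corresponding segments where the sequence
--     contains consecutive values of 1. For example, the sequence
--     [0,0,1,1,1,1,0,0,0,1,1,0,0,0] would result in two sequential
--     sequences:
--
--     1) Sequence formed by indexes [2,3,4,5]
--     2) Sequence forme by indexes [9,10]
--
--     Arguments:
--         indicating_sequence: the data indicating sequence.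
--
--     Output:
--         sequential_indicating_sequences: the sequential indicating sequence.
--     """
--
--     is_interval = False
--     sequential_indicating_sequences = []
--     aux_arr = []
--
--     for idx in range(len(indicating_sequence)):
--
--         if not is_interval and indicating_sequence[idx] == 1:
--             is_interval = True
--
--         if is_interval and indicating_sequence[idx] == 1:
--             aux_arr.append(idx)
--
--         if idx < len(indicating_sequence) - 1:
--             if (
--                 is_interval
--                 and indicating_sequence[idx] == 1
--                 and indicating_sequence[idx + 1] == 0
--             ):
--
--                 is_interval = False
--                 sequential_indicating_sequences.append(aux_arr)
--                 aux_arr = []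
--         else:
--             if aux_arr != []:
--                 sequential_indicating_sequences.append(aux_arr)
--
--     return sequential_indicating_sequences
-- ===== SOURCE B (Python) =====
-- def _create_sequential_indicating_sequences(indicating_sequence):
--     n = len(indicating_sequence)
--     groups = []
--     # single right-to-left pass building the result back-to-front
--     for i in reversed(range(n)):
--         if indicating_sequence[i] == 1:
--             if i < n - 1 and indicating_sequence[i + 1] == 0:
--                 # a run ends here: open a fresh group in front
--                 groups.insert(0, [i])
--             elif groups:
--                 groups[0].insert(0, i)
--             else:
--                 groups.insert(0, [i])
--     return groups
-- ===== Notes on version B (the rewrite author's own statement) =====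
-- stated objective: alternative
-- what changed: B replaces A's forward is_interval state machine (flush-on-boundary with an aux buffer) by a single right-to-left pass that builds the result back-to-front: each index holding a 1 either opens a fresh front group (when the next element is 0) or is prepended to the current front group.
import Mathlib
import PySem

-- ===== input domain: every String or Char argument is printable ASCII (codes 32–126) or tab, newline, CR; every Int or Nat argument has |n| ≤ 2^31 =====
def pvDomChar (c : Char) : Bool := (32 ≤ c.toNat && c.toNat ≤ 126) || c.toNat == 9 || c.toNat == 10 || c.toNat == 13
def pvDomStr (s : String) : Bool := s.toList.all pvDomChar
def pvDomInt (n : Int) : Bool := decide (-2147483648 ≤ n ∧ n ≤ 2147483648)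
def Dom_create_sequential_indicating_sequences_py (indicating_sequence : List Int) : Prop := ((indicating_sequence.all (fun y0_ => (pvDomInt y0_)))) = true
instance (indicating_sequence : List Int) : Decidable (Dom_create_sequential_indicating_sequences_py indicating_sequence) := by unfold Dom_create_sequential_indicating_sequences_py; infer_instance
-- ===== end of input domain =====

-- B replaces A's forward is_interval state machine by a single right-to-left pass that
-- builds the result back-to-front (objective: alternative, same cost).

-- ===== PORT A =====
-- one loop iteration of A: state (is_interval, (result, aux_arr))
def aStep (seq : List Int) (n : Int) (st : Bool × List (List Int) × List Int) (idx : Int) :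
    Bool × List (List Int) × List Int :=
  let v := (PySem.List.pyGet? seq idx).getD 0   -- idx is always in range here
  let isInt := if !st.1 && v == 1 then true else st.1
  let aux := if isInt && v == 1 then st.2.2 ++ [idx] else st.2.2
  if idx < n - 1 then
    if isInt && v == 1 && ((PySem.List.pyGet? seq (idx + 1)).getD 0 == 0) then
      (false, st.2.1 ++ [aux], [])
    else (isInt, st.2.1, aux)
  else
    if aux ≠ [] then (isInt, st.2.1 ++ [aux], aux)
    else (isInt, st.2.1, aux)

def create_sequential_indicating_sequences_py (indicating_sequence : List Int) : List (List Int) :=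
  let n : Int := indicating_sequence.length
  ((PySem.List.pyRange 0 n 1).foldl (aStep indicating_sequence n) (false, ([], []))).2.1

-- ===== PORT B =====
-- one iteration of B's reversed loop (processed right-to-left, hence a foldr):
-- p = (i, seq[i]); groups is the result built so far for the suffix to the right of i
def bStep (seq : List Int) (n : Int) (p : Int × Int) (groups : List (List Int)) :
    List (List Int) :=
  if p.2 == 1 then
    if p.1 < n - 1 ∧ ((PySem.List.pyGet? seq (p.1 + 1)).getD 0 == 0) then
      [p.1] :: groups                      -- a run ends here: open a fresh front group
    else
      match groups with
      | [] => [[p.1]]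
      | g :: t => (p.1 :: g) :: t          -- prepend i to the current front group
  else groups

def create_sequential_indicating_sequences_py_alt (indicating_sequence : List Int) : List (List Int) :=
  let n : Int := indicating_sequence.length
  (PySem.List.enumerate indicating_sequence 0).foldr (bStep indicating_sequence n) []

-- ===== PRECONDITION & SPEC =====
def Spec_create_sequential_indicating_sequences_py (indicating_sequence : List Int) (out : List (List Int)) : Prop := out = create_sequential_indicating_sequences_py_alt indicating_sequence
instance (indicating_sequence : List Int) (out : List (List Int)) : Decidable (Spec_create_sequential_indicating_sequences_py indicating_sequence out) := by unfold Spec_create_sequential_indicating_sequences_py; infer_instance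

-- ===== CLAIM (what is proved, stated in full; the proofs are below) =====
def Claim_equal_create_sequential_indicating_sequences_py : Prop := ∀ (indicating_sequence : List Int), Dom_create_sequential_indicating_sequences_py indicating_sequence → Spec_create_sequential_indicating_sequences_py indicating_sequence (create_sequential_indicating_sequences_py indicating_sequence)

-- ===== LEMMAS AND PROOFS =====

-- merging A's pending open group `aux` into the front of B's groups for the remaining suffix
def mergeAux (x : List Int) (gs : List (List Int)) : List (List Int) :=
  if x = [] then gs else
    match gs with
    | [] => [x]
    | g :: t => (x ++ g) :: t

-- prepend m to the front group (creating it if absent) — the non-boundary bStep action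
def prependFront (m : Int) (gs : List (List Int)) : List (List Int) :=
  match gs with
  | [] => [[m]]
  | g :: t => (m :: g) :: t

lemma mergeAux_append (x : List Int) (m : Int) (gs : List (List Int)) :
    mergeAux (x ++ [m]) gs = mergeAux x (prependFront m gs) := by
  cases gs <;> by_cases hx : x = [] <;> simp [mergeAux, prependFront, hx]

lemma loop_eq (suf : List Int) (hsuf : suf ≠ []) :
    ∀ (pre : List Int) (isInt : Bool) (res : List (List Int)) (aux : List Int),
      (((PySem.List.pyRange (pre.length : Int) ((pre ++ suf).length : Int) 1).foldl
          (aStep (pre ++ suf) ((pre ++ suf).length : Int)) (isInt, (res, aux))).2.1)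
      =
      res ++ mergeAux aux
        ((PySem.List.enumerate suf (pre.length : Int)).foldr
          (bStep (pre ++ suf) ((pre ++ suf).length : Int)) []) := by
  induction suf with
  | nil => exact absurd rfl hsuf
  | cons v tl ih =>
    intro pre isInt res aux
    have hget : PySem.List.pyGet? (pre ++ v :: tl) ((pre.length : Nat) : Int) = some v :=
      PySem.List.pyGet?_append_length pre tl v
    cases tl with
    | nil =>
      have hb : ((pre ++ [v]).length : Int) = (pre.length : Int) + 1 := by simp
      have hrange : PySem.List.pyRange (pre.length : Int) ((pre ++ [v]).length : Int) 1
          = [(pre.length : Int)] := by rw [hb]; exact PySem.List.pyRange_one_singleton _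
      have hnlt : ¬ ((pre.length : Int) < ((pre ++ [v]).length : Int) - 1) := by
        rw [hb]; omega
      rw [hrange]
      by_cases hv : v = 1
      · subst hv
        by_cases haux : aux = [] <;>
          simp [aStep, bStep, mergeAux, PySem.List.enumerate, haux]
      · simp only [List.foldl_cons, List.foldl_nil, PySem.List.enumerate_cons,
          PySem.List.enumerate_nil, List.foldr_cons, List.foldr_nil]
        have hA : aStep (pre ++ [v]) ((pre ++ [v]).length : Int) (isInt, (res, aux))
            (pre.length : Int) = if aux = [] then (isInt, (res, aux))
              else (isInt, (res ++ [aux], aux)) := by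
          simp [aStep, hv]
        rw [hA]
        have hB : bStep (pre ++ [v]) ((pre ++ [v]).length : Int) ((pre.length : Int), v) []
            = [] := by simp [bStep, hv]
        rw [hB]
        by_cases haux : aux = [] <;> simp [haux, mergeAux]
    | cons w rest =>
      have hlt : (pre.length : Int) < ((pre ++ v :: w :: rest).length : Int) := by
        simp; omega
      have hc : (pre.length : Int) < (pre.length : Int) + ((rest.length : Int) + 1 + 1) - 1 := by
        omega
      have hc' : (pre.length : Int) < ((pre ++ v :: w :: rest).length : Int) - 1 := by
        simp; omega
      have hg2 : (PySem.List.pyGet? (pre ++ v :: w :: rest) ((pre.length : Int) + 1))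
          = some w := by
        have h := PySem.List.pyGet?_append_right (pre := pre) (ys := v :: w :: rest) (k := 1)
        simpa using h
      have ih' := ih (by simp) (pre ++ [v])
      rw [show pre ++ [v] ++ w :: rest = pre ++ v :: w :: rest from by simp,
        show ((pre ++ [v]).length : Int) = (pre.length : Int) + 1 from by simp] at ih'
      rw [PySem.List.pyRange_one_cons hlt, List.foldl_cons,
        PySem.List.enumerate_cons, List.foldr_cons]
      set Btl := (PySem.List.enumerate (w :: rest) ((pre.length : Int) + 1)).foldr
        (bStep (pre ++ v :: w :: rest) ((pre ++ v :: w :: rest).length : Int)) [] with hBtl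
      clear_value Btl
      by_cases hv : v = 1
      · subst hv
        by_cases hw : w = 0
        · subst hw
          have hstep : aStep (pre ++ 1 :: 0 :: rest) ((pre ++ 1 :: 0 :: rest).length : Int)
              (isInt, (res, aux)) (pre.length : Int)
              = (false, (res ++ [aux ++ [(pre.length : Int)]], [])) := by
            simp [aStep, hget, hg2, hc]
          have hbstep : bStep (pre ++ 1 :: 0 :: rest) ((pre ++ 1 :: 0 :: rest).length : Int)
              ((pre.length : Int), 1) Btl = [(pre.length : Int)] :: Btl := by
            simp [bStep, hg2]
          rw [hstep, hbstep, ih' false (res ++ [aux ++ [(pre.length : Int)]]) []]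
          by_cases haux : aux = [] <;> simp [mergeAux, haux]
        · have hstep : aStep (pre ++ 1 :: w :: rest) ((pre ++ 1 :: w :: rest).length : Int)
              (isInt, (res, aux)) (pre.length : Int)
              = (true, (res, aux ++ [(pre.length : Int)])) := by
            simp [aStep, hget, hg2, hc, hw]
          have hbstep : bStep (pre ++ 1 :: w :: rest) ((pre ++ 1 :: w :: rest).length : Int)
              ((pre.length : Int), 1) Btl = prependFront (pre.length : Int) Btl := by
            cases Btl <;> simp [bStep, prependFront, hg2, hw]
          rw [hstep, hbstep, ih' true res (aux ++ [(pre.length : Int)]), mergeAux_append]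
      · have hstep : aStep (pre ++ v :: w :: rest) ((pre ++ v :: w :: rest).length : Int)
            (isInt, (res, aux)) (pre.length : Int)
            = (isInt, (res, aux)) := by
          simp [aStep, hget, hc, hv]
        have hbstep : bStep (pre ++ v :: w :: rest) ((pre ++ v :: w :: rest).length : Int)
            ((pre.length : Int), v) Btl = Btl := by
          simp [bStep, hv]
        rw [hstep, hbstep, ih' isInt res aux]

-- ===== VERDICT (by name: the statement is the Claim_ definition above) =====
theorem create_sequential_indicating_sequences_py_spec : Claim_equal_create_sequential_indicating_sequences_py := by
  intro seq _
  unfold Spec_create_sequential_indicating_sequences_py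
  cases seq with
  | nil => rfl
  | cons v tl =>
      have h := loop_eq (v :: tl) (by simp) [] false [] []
      simpa [create_sequential_indicating_sequences_py,
        create_sequential_indicating_sequences_py_alt, mergeAux] using h
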